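-- pv_equiv track=rewrite | github.com/M1G3L/engeto_academy | project_1/project_1.py | get_words_lengths
-- ===== SOURCE A (Python) =====
-- def get_words_lengths(text:str) -> dict:
--     word_count = {}
--     for word in text.split():
--       length = len(word)
--       if length in word_count:
--           word_count[length] += 1
--       else:
--           word_count[length] = 1
--
--     # Sort the dictionary by keys (lenght of words)
--     sorted_word_count = dict(sorted(word_count.items()))
--     return sorted_word_count
-- ===== SOURCE B (Python) =====
-- def get_words_lengths(text: str) -> dict:
--     # sort all word lengths, then count consecutive runs (sort-then-group instead of hash-count-then-sort)
--     lengths = sorted(len(w) for w in text.split())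
--     result = {}
--     prev = None
--     count = 0
--     for L in lengths:
--         if L == prev:
--             count += 1
--         else:
--             if prev is not None:
--                 result[prev] = count
--             prev = L
--             count = 1
--     if prev is not None:
--         result[prev] = count
--     return result
-- ===== Notes on version B (the rewrite author's own statement) =====
-- stated objective: alternative
-- what changed: A counts word lengths in a dict and then sorts the dict items; B sorts all word lengths first and counts consecutive runs in a single pass, so no counting dict or final key sort is needed.
import Mathlib
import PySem

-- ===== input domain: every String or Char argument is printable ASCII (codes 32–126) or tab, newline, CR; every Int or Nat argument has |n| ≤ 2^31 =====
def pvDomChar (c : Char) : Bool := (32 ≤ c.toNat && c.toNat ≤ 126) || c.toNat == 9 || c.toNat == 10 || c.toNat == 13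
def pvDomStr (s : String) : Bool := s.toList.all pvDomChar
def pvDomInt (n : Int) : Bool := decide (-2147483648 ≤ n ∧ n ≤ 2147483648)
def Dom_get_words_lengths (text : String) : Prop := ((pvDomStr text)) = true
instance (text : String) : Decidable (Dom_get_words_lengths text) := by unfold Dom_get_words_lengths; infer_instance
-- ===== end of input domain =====

-- B replaces A's hash-count-then-sort-keys by sort-all-lengths-then-group-consecutive-runs (alternative decomposition, same result).

-- ===== PORT A =====
-- loop body of A's 'for word in text.split()' (check membership, then increment or initialise)
def pvStepA (d : PySem.Dict Int Int) (w : String) : PySem.Dict Int Int :=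
  let length : Int := PySem.Str.len w
  if d.contains length then d.insert length (d.getD length 0 + 1)
  else d.insert length 1

def get_words_lengths (text : String) : List (Int × Int) :=
  let word_count := (PySem.Str.split₀ text).foldl pvStepA PySem.Dict.empty
  -- dict(sorted(word_count.items())): pairs compared lexicographically
  PySem.List.sorted2 word_count.items Prod.fst Prod.snd false

-- ===== PORT B =====
-- loop body of B's 'for L in lengths' (extend the current run or flush it and start a new one)
def pvStepB (st : PySem.Dict Int Int × Option Int × Int) (L : Int) :
    PySem.Dict Int Int × Option Int × Int :=
  if st.2.1 = some L then (st.1, st.2.1, st.2.2 + 1)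
  else
    match st.2.1 with
    | some p => (st.1.insert p st.2.2, some L, 1)
    | none => (st.1, some L, 1)

-- B's trailing 'if prev is not None: result[prev] = count'
def pvFlushB (st : PySem.Dict Int Int × Option Int × Int) : PySem.Dict Int Int :=
  match st.2.1 with
  | some p => st.1.insert p st.2.2
  | none => st.1

def get_words_lengths_alt (text : String) : List (Int × Int) :=
  let lengths := PySem.List.sorted
    ((PySem.Str.split₀ text).map (fun w => PySem.Str.len w)) (fun x => x) false
  (pvFlushB (lengths.foldl pvStepB (PySem.Dict.empty, none, 0))).items

-- ===== PRECONDITION & SPEC =====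
def Spec_get_words_lengths (text : String) (out : List (Int × Int)) : Prop := out = get_words_lengths_alt text
instance (text : String) (out : List (Int × Int)) : Decidable (Spec_get_words_lengths text out) := by unfold Spec_get_words_lengths; infer_instance

-- ===== CLAIM (what is proved, stated in full; the proofs are below) =====
def Claim_equal_get_words_lengths : Prop := ∀ (text : String), Dom_get_words_lengths text → Spec_get_words_lengths text (get_words_lengths text)

-- ===== LEMMAS AND PROOFS =====

-- counts-by-key view shared by both directions of the proof
def pvG (l : List Int) : List (Int × Int) :=
  (PySem.Set.ofList l).map (fun k => (k, (l.count k : Int)))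

-- run-length recursion that pvStepB/pvFlushB implement on the sorted list
def pvGspec (p c : Int) : List Int → List (Int × Int)
  | [] => [(p, c)]
  | x :: xs => if x = p then pvGspec p (c + 1) xs else (p, c) :: pvGspec x 1 xs

lemma pvStepA_eq (d : PySem.Dict Int Int) (w : String) :
    pvStepA d w = d.insert (PySem.Str.len w) (d.getD (PySem.Str.len w) 0 + 1) := by
  show (if d.contains (PySem.Str.len w) = true then d.insert (PySem.Str.len w) (d.getD (PySem.Str.len w) 0 + 1)
      else d.insert (PySem.Str.len w) 1) = _
  by_cases h : d.contains (PySem.Str.len w) = true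
  · rw [if_pos h]
  · rw [if_neg h, PySem.Dict.getD_of_not_contains d 0 (by simpa using h)]
    norm_num

-- A's dictionary is Counter(map(len, words)) as items
lemma portA_eq (text : String) :
    get_words_lengths text =
      PySem.List.sorted2 (pvG ((PySem.Str.split₀ text).map (fun w => PySem.Str.len w)))
        Prod.fst Prod.snd false := by
  unfold get_words_lengths pvG
  have h1 : (PySem.Str.split₀ text).foldl pvStepA PySem.Dict.empty
      = ((PySem.Str.split₀ text).map (fun w => PySem.Str.len w)).foldl
          (fun d x => d.insert x (d.getD x 0 + 1)) PySem.Dict.empty := by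
    rw [List.foldl_map]
    exact PySem.List.foldl_congr_mem _ _ _ _ (fun acc x _ => pvStepA_eq acc x)
  rw [h1, PySem.Dict.foldl_insert_getD_add_one_eq_counter]
  simp only [PySem.Dict.items_counter]

lemma insertBy_congr {α : Type} (f g : α → α → Bool) (x : α) (ys : List α)
    (h : ∀ y ∈ ys, f x y = g x y) :
    PySem.List.insertBy f x ys = PySem.List.insertBy g x ys := by
  induction ys with
  | nil => rfl
  | cons y ys ih =>
      simp only [PySem.List.insertBy]
      rw [h y (by simp)]
      split_ifs with hc
      · rfl
      · rw [ih (fun z hz => h z (by simp [hz]))]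

-- sorted2 by (k1, k2) is sorted by k1 when the k1-values are pairwise distinct
lemma sorted2_eq_sorted_of_nodup {α : Type} (xs : List α) (k1 : α → Int) (k2 : α → Int)
    (hnd : (xs.map k1).Nodup) :
    PySem.List.sorted2 xs k1 k2 false = PySem.List.sorted xs k1 false := by
  unfold PySem.List.sorted2 PySem.List.sorted
  simp only [if_neg (by decide : ¬ (false = true))]
  suffices h : ∀ (l : List α) (acc : List α),
      (l.map k1).Nodup → (∀ x ∈ l, ∀ y ∈ acc, k1 x ≠ k1 y) →
      l.foldl (fun acc x => PySem.List.insertBy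
          (fun a b => decide (k1 a < k1 b) || !decide (k1 b < k1 a) && decide (k2 a < k2 b)) x acc) acc
        = l.foldl (fun acc x => PySem.List.insertBy (fun a b => decide (k1 a < k1 b)) x acc) acc by
    exact h xs [] hnd (by simp)
  intro l
  induction l with
  | nil => intro acc _ _; rfl
  | cons x l ih =>
      intro acc hnd hfresh
      simp only [List.foldl_cons]
      have hins : PySem.List.insertBy
          (fun a b => decide (k1 a < k1 b) || !decide (k1 b < k1 a) && decide (k2 a < k2 b)) x acc
          = PySem.List.insertBy (fun a b => decide (k1 a < k1 b)) x acc := by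
        apply insertBy_congr
        intro y hy
        have hne := hfresh x (by simp) y hy
        have : k1 x < k1 y ∨ k1 y < k1 x := lt_or_gt_of_ne hne
        rcases this with h | h <;> simp [h, not_lt_of_gt]
      rw [hins]
      rw [List.map_cons, List.nodup_cons] at hnd
      apply ih
      · exact hnd.2
      · intro z hz y hy
        rw [PySem.List.mem_insertBy] at hy
        rcases hy with rfl | hy
        · intro hcontra
          exact hnd.1 (hcontra ▸ List.mem_map_of_mem hz)
        · exact hfresh z (by simp [hz]) y hy

-- the fold over the sorted tail followed by the final flush is exactly pvGspec, appended to d.items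
lemma foldB_eq_gspec (t : List Int) : ∀ (d : PySem.Dict Int Int) (p c : Int),
    (∀ k ∈ d.keys, k < p) → t.Pairwise (· ≤ ·) → (∀ x ∈ t, p ≤ x) →
    (pvFlushB (t.foldl pvStepB (d, some p, c))).items = d.items ++ pvGspec p c t := by
  induction t with
  | nil =>
      intro d p c hk _ _
      have hcont : d.contains p = false := by
        rw [PySem.Dict.contains_eq_decide_mem_keys]
        simp only [decide_eq_false_iff_not]
        intro hmem; exact absurd (hk p hmem) (lt_irrefl p)
      simp [pvFlushB, pvGspec, PySem.Dict.items_insert_of_not_contains (h := hcont)]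
  | cons x t ih =>
      intro d p c hk hpw hge
      have hpx : p ≤ x := hge x (by simp)
      have hpwt : t.Pairwise (· ≤ ·) := (List.pairwise_cons.mp hpw).2
      have hxt : ∀ y ∈ t, x ≤ y := (List.pairwise_cons.mp hpw).1
      by_cases hxp : x = p
      · subst hxp
        have hstep : pvStepB (d, some x, c) x = (d, some x, c + 1) := by
          simp [pvStepB]
        simp only [List.foldl_cons, hstep, pvGspec]
        exact ih d x (c + 1) hk hpwt (fun y hy => le_trans hpx (hxt y hy))
      · have hplt : p < x := lt_of_le_of_ne hpx (fun h => hxp h.symm)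
        have hstep : pvStepB (d, some p, c) x = (d.insert p c, some x, 1) := by
          simp only [pvStepB]
          rw [if_neg (by simp; exact fun h => hxp h.symm)]
        have hcont : d.contains p = false := by
          rw [PySem.Dict.contains_eq_decide_mem_keys]
          simp only [decide_eq_false_iff_not]
          intro hmem; exact absurd (hk p hmem) (lt_irrefl p)
        simp only [List.foldl_cons, hstep, pvGspec, if_neg hxp]
        rw [ih (d.insert p c) x 1
          (by intro k hkm
              rcases (PySem.Dict.mem_keys_insert _ _ _ _).mp hkm with rfl | hkm
              · exact hplt
              · exact lt_trans (hk k hkm) hplt)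
          hpwt hxt]
        rw [PySem.Dict.items_insert_of_not_contains (h := hcont)]
        simp

-- pvGspec on a sorted tail t (all ≥ p) lists each distinct value with its count
lemma gspec_counts (t : List Int) : ∀ (p c : Int),
    t.Pairwise (· ≤ ·) → (∀ x ∈ t, p ≤ x) →
    pvGspec p c t = (PySem.Set.ofList (p :: t)).map
      (fun k => if k = p then (k, c + (t.count p : Int)) else (k, (t.count k : Int))) := by
  induction t with
  | nil =>
      intro p c _ _
      simp [pvGspec, PySem.Set.ofList]
  | cons x t ih =>
      intro p c hpw hge
      have hpx : p ≤ x := hge x (by simp)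
      have hpwt : t.Pairwise (· ≤ ·) := (List.pairwise_cons.mp hpw).2
      have hxt : ∀ y ∈ t, x ≤ y := (List.pairwise_cons.mp hpw).1
      by_cases hxp : x = p
      · subst hxp
        rw [pvGspec, if_pos rfl, ih x (c + 1) hpwt hxt]
        have hset : PySem.Set.ofList (x :: x :: t) = PySem.Set.ofList (x :: t) := by
          simp [PySem.Set.ofList_cons, PySem.Set.discard]
        rw [hset]
        apply List.map_congr_left
        intro k _
        by_cases hk : k = x
        · subst hk; simp; ring
        · simp [hk, Ne.symm hk]
      · have hplt : p < x := lt_of_le_of_ne hpx (fun h => hxp h.symm)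
        have hpnot : p ∉ x :: t := by
          intro hmem
          rcases List.mem_cons.mp hmem with rfl | hmem
          · exact hxp rfl
          · exact absurd (hxt p hmem) (not_le_of_gt hplt)
        rw [pvGspec, if_neg hxp, ih x 1 hpwt hxt]
        have hset : PySem.Set.ofList (p :: x :: t) = p :: PySem.Set.ofList (x :: t) := by
          rw [PySem.Set.ofList_cons]
          congr 1
          have hnm : p ∉ PySem.Set.ofList (x :: t) := by
            rw [PySem.Set.mem_ofList]; exact hpnot
          unfold PySem.Set.discard
          exact List.filter_eq_self.mpr (fun a ha => by simp; rintro rfl; exact hnm ha)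
        rw [hset, List.map_cons, if_pos rfl]
        have hcnt : (x :: t).count p = 0 := List.count_eq_zero.mpr hpnot
        rw [hcnt]
        simp only [Nat.cast_zero, add_zero]
        congr 1
        apply List.map_congr_left
        intro k hkm
        have hkne : k ≠ p := by
          rw [PySem.Set.mem_ofList] at hkm
          intro h; exact hpnot (h ▸ hkm)
        by_cases hk : k = x
        · subst hk
          simp only [if_neg hkne, List.count_cons_self]
          push_cast; ring_nf
        · simp [hkne, hk, Ne.symm hk]

-- B computes pvG of the sorted length list
lemma portB_eq (text : String) :
    get_words_lengths_alt text =
      pvG (PySem.List.sorted ((PySem.Str.split₀ text).map (fun w => PySem.Str.len w)) (fun x => x) false) := by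
  unfold get_words_lengths_alt
  set sls := PySem.List.sorted ((PySem.Str.split₀ text).map (fun w => PySem.Str.len w)) (fun x => x) false with hsls
  have hpw : sls.Pairwise (· ≤ ·) := by
    simpa using PySem.List.sorted_pairwise ((PySem.Str.split₀ text).map (fun w => PySem.Str.len w)) (fun x => x)
  match hm : sls with
  | [] => simp [pvFlushB, pvG, PySem.Set.ofList, PySem.Dict.empty]
  | h :: t =>
      have hstep : pvStepB (PySem.Dict.empty, none, 0) h = (PySem.Dict.empty, some h, 1) := by
        simp [pvStepB]
      simp only [List.foldl_cons, hstep]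
      rw [foldB_eq_gspec t PySem.Dict.empty h 1 (by simp [PySem.Dict.keys, PySem.Dict.empty])
        (List.pairwise_cons.mp hpw).2 (List.pairwise_cons.mp hpw).1]
      rw [gspec_counts t h 1 (List.pairwise_cons.mp hpw).2 (List.pairwise_cons.mp hpw).1]
      have : (PySem.Dict.empty : PySem.Dict Int Int).items = [] := rfl
      rw [this, List.nil_append]
      unfold pvG
      apply List.map_congr_left
      intro k _
      by_cases hk : k = h
      · subst hk; simp; ring
      · simp [hk, Ne.symm hk]

-- PySem.Set.ofList is a sublist of its argument (keeps first occurrences in order)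
lemma ofList_sublist (l : List Int) : (PySem.Set.ofList l).Sublist l := by
  induction l with
  | nil => simp [PySem.Set.ofList]
  | cons x l ih =>
      rw [PySem.Set.ofList_cons]
      exact List.Sublist.cons₂ x (List.Sublist.trans (List.filter_sublist) ih)

-- ===== VERDICT (by name: the statement is the Claim_ definition above) =====
theorem get_words_lengths_spec : Claim_equal_get_words_lengths := by
  intro text _
  unfold Spec_get_words_lengths
  rw [portA_eq, portB_eq]
  set ls := (PySem.Str.split₀ text).map (fun w => PySem.Str.len w) with hls
  set sls := PySem.List.sorted ls (fun x => x) false with hsls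
  -- distinct first components on A's side
  have hnd : ((pvG ls).map Prod.fst).Nodup := by
    unfold pvG
    rw [List.map_map]
    have he : (Prod.fst ∘ fun k => (k, (ls.count k : Int))) = id := rfl
    rw [he, List.map_id]
    exact PySem.Set.nodup_ofList ls
  rw [sorted2_eq_sorted_of_nodup _ _ _ hnd]
  -- B's list is a permutation of A's list, strictly increasing in the key
  have hperm : (pvG sls).Perm (pvG ls) := by
    have hp : (PySem.Set.ofList sls).Perm (PySem.Set.ofList ls) := by
      apply (List.perm_ext_iff_of_nodup (PySem.Set.nodup_ofList _) (PySem.Set.nodup_ofList _)).mpr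
      intro k
      simp [PySem.Set.mem_ofList, hsls, PySem.List.mem_sorted]
    have hcnt : ∀ k : Int, sls.count k = ls.count k := by
      intro k
      exact (PySem.List.sorted_perm ls (fun x => x) false).count_eq k
    unfold pvG
    have : (PySem.Set.ofList sls).map (fun k => (k, (sls.count k : Int)))
        = (PySem.Set.ofList sls).map (fun k => (k, (ls.count k : Int))) := by
      apply List.map_congr_left; intro k _; rw [hcnt k]
    rw [this]
    exact hp.map _
  have hpairwise : (pvG sls).Pairwise (fun a b => a.1 < b.1) := by
    have h1 : (PySem.Set.ofList sls).Pairwise (· < ·) := by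
      have hle : sls.Pairwise (· ≤ ·) := by
        simpa using PySem.List.sorted_pairwise ls (fun x => x)
      have hsub : (PySem.Set.ofList sls).Pairwise (· ≤ ·) := hle.sublist (ofList_sublist sls)
      have hnodup : (PySem.Set.ofList sls).Pairwise (· ≠ ·) := PySem.Set.nodup_ofList sls
      exact (hsub.and hnodup).imp (fun h => lt_of_le_of_ne h.1 h.2)
    unfold pvG
    exact List.pairwise_map.mpr (h1.imp (fun h => h))
  exact PySem.List.sorted_eq_of_perm_of_pairwise_lt (pvG ls) (pvG sls) Prod.fst hperm hpairwise
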